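-- pv_equiv track=rewrite | github.com/aarspace/PCV-Poker-Card | Controller/player_vs_bot_cont.py | is_two_pair_bot
-- ===== SOURCE A (Python) =====
-- from collections import Counter
--
-- def is_two_pair_bot(ranks, bot_cards):
--     """
--     Mengidentifikasi apakah ada Two Pair dalam ranks dan mengembalikan pasangan-pasangan yang ditemukan.
--     """
--     rank_counts = Counter(ranks)
--     pairs = [rank for rank, count in rank_counts.items() if count == 2]
--
--     if len(pairs) == 2:
--         # Ambil kartu yang cocok dengan dua pasangan tersebut
--         two_pair_cards = []
--         for pair in pairs:
--             two_pair_cards.extend([card for card in bot_cards if card.split(' of ')[0] == pair])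
--         return two_pair_cards
--     return None
-- ===== SOURCE B (Python) =====
-- from collections import Counter
--
-- def is_two_pair_bot(ranks, bot_cards):
--     groups = {}
--     for card in bot_cards:
--         groups.setdefault(card.split(' of ')[0], []).append(card)
--     pairs = [rank for rank, count in Counter(ranks).items() if count == 2]
--     if len(pairs) == 2:
--         return groups.get(pairs[0], []) + groups.get(pairs[1], [])
--     return None
-- ===== Notes on version B (the rewrite author's own statement) =====
-- stated objective: idiomatic
-- what changed: B builds a rank->cards index over bot_cards in one pass with setdefault and answers the two pairs by dict lookups, instead of A's per-pair rescans of bot_cards.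
import Mathlib
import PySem

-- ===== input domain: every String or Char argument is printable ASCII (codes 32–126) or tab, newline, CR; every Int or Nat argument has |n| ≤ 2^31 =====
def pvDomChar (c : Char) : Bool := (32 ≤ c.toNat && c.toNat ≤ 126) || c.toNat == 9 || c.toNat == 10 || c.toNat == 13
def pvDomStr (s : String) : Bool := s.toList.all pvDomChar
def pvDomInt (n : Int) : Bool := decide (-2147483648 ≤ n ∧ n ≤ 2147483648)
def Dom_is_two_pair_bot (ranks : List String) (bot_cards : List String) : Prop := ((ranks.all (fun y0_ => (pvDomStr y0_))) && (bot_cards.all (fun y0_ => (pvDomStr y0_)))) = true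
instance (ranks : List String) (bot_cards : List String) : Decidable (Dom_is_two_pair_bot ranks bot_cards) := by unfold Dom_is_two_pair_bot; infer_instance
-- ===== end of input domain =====

-- B replaces A's per-pair rescans of bot_cards by a one-pass rank->cards index plus two lookups (idiomatic; return value identical).

-- ===== PORT A =====
-- card.split(' of ')[0]  (split with a non-empty separator always yields a non-empty list)
def pvCardRank (c : String) : String := ((PySem.Str.split? c " of ").getD []).headD ""

def is_two_pair_bot (ranks : List String) (bot_cards : List String) : Option (List String) :=
  let rank_counts := PySem.Dict.counter ranks
  let pairs := (rank_counts.items.filter (fun rc => rc.2 == 2)).map (·.1)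
  if pairs.length = 2 then
    -- for pair in pairs: two_pair_cards.extend([card for card in bot_cards if card.split(' of ')[0] == pair])
    some (pairs.foldl (fun acc pair => acc ++ bot_cards.filter (fun card => pvCardRank card == pair)) [])
  else none

-- ===== PORT B =====
def is_two_pair_bot_alt (ranks : List String) (bot_cards : List String) : Option (List String) :=
  -- groups.setdefault(card.split(' of ')[0], []).append(card)
  let groups := bot_cards.foldl (fun d card => d.modify (pvCardRank card) [] (· ++ [card])) PySem.Dict.empty
  let pairs := ((PySem.Dict.counter ranks).items.filter (fun rc => rc.2 == 2)).map (·.1)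
  match pairs with
  | [p, q] => some (groups.getD p [] ++ groups.getD q [])
  | _ => none

-- ===== PRECONDITION & SPEC =====
def Spec_is_two_pair_bot (ranks : List String) (bot_cards : List String) (out : Option (List String)) : Prop := out = is_two_pair_bot_alt ranks bot_cards
instance (ranks : List String) (bot_cards : List String) (out : Option (List String)) : Decidable (Spec_is_two_pair_bot ranks bot_cards out) := by unfold Spec_is_two_pair_bot; infer_instance

-- ===== CLAIM (what is proved, stated in full; the proofs are below) =====
def Claim_equal_is_two_pair_bot : Prop := ∀ (ranks : List String) (bot_cards : List String), Dom_is_two_pair_bot ranks bot_cards → Spec_is_two_pair_bot ranks bot_cards (is_two_pair_bot ranks bot_cards)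

-- ===== LEMMAS AND PROOFS =====

-- the one-pass index retrieves, for each rank p, exactly A's filter of bot_cards
theorem groups_getD (cards : List String) (d : PySem.Dict String (List String)) (p : String) :
    (cards.foldl (fun d card => d.modify (pvCardRank card) [] (· ++ [card])) d).getD p []
      = d.getD p [] ++ cards.filter (fun card => pvCardRank card == p) := by
  induction cards generalizing d with
  | nil => simp
  | cons c cs ih =>
    simp only [List.foldl_cons, ih, List.filter_cons]
    by_cases h : pvCardRank c = p
    · subst h; rw [PySem.Dict.getD_modify_self]; simp
    · rw [PySem.Dict.getD_modify_of_ne]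
      · simp [h]
      · exact fun hh => h hh.symm

-- ===== VERDICT (by name: the statement is the Claim_ definition above) =====
theorem is_two_pair_bot_spec : Claim_equal_is_two_pair_bot := by
  intro ranks bot_cards _
  unfold Spec_is_two_pair_bot is_two_pair_bot is_two_pair_bot_alt
  simp only
  set pairs := (((PySem.Dict.counter ranks).items.filter (fun rc => rc.2 == 2)).map (·.1)) with hp
  match pairs with
  | [] => simp
  | [_] => simp
  | [p, q] =>
      simp only [List.foldl_cons, List.foldl_nil, List.nil_append, groups_getD]
      simp
  | _ :: _ :: _ :: _ => simp
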